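-- pv_equiv track=rewrite | github.com/getzen-health/DreamAnalysis | ml/models/device_adapters.py | _find_frontal_pair
-- ===== SOURCE A (Python) =====
-- from typing import Dict, List, Optional, Tuple
--
-- def _find_frontal_pair(channels: List[str]) -> Tuple[Optional[int], Optional[int]]:
--     """Find left and right frontal channel indices."""
--     left_frontal = {"AF3", "AF7", "F3", "FP1", "F7"}
--     right_frontal = {"AF4", "AF8", "F4", "FP2", "F8"}
--
--     left_idx = None
--     right_idx = None
--
--     for i, ch in enumerate(channels):
--         if ch in left_frontal and left_idx is None:
--             left_idx = i
--         if ch in right_frontal and right_idx is None: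
--             right_idx = i
--
--     return left_idx, right_idx
-- ===== SOURCE B (Python) =====
-- from typing import Dict, List, Optional, Tuple
--
-- def _find_frontal_pair(channels: List[str]) -> Tuple[Optional[int], Optional[int]]:
--     """Find left and right frontal channel indices."""
--     left_frontal = {"AF3", "AF7", "F3", "FP1", "F7"}
--     right_frontal = {"AF4", "AF8", "F4", "FP2", "F8"}
--
--     def first_of(names):
--         hits = [channels.index(n) for n in names if n in channels]
--         return min(hits) if hits else None
--
--     return first_of(left_frontal), first_of(right_frontal)
-- ===== Notes on version B (the rewrite author's own statement) =====
-- stated objective: alternative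
-- what changed: B inverts the traversal: instead of A's single scan over channels with two None-guard flags, B iterates over the ten fixed candidate names, looks each up with channels.index, and returns the min of the found indices per side (first match = minimal index).
import Mathlib
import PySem

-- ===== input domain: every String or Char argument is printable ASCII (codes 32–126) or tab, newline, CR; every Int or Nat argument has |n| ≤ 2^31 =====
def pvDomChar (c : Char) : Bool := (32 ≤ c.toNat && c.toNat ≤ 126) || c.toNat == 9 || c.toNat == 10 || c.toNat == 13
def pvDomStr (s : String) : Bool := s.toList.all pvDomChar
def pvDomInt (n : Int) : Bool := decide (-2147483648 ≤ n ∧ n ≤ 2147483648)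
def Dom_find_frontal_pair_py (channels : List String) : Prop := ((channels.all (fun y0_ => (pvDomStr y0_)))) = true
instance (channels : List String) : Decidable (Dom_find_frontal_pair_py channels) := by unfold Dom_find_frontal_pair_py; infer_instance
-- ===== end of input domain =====

-- B inverts the traversal: instead of A's single scan over channels with two None-guard
-- flags, B looks up each of the ten fixed candidate names with channels.index and takes
-- the min of the found indices per side (first match = minimal index); objective: alternative.

-- ===== PORT A =====
def pvLeftFrontal : List String := PySem.Set.ofList ["AF3", "AF7", "F3", "FP1", "F7"]
def pvRightFrontal : List String := PySem.Set.ofList ["AF4", "AF8", "F4", "FP2", "F8"]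

-- A's for-loop over enumerate(channels), carrying (left_idx, right_idx) and updating
-- each component under its None-guard, branches in A's order
def pvLoopA (chs : List String) (i : Int) (l r : Option Int) : Option Int × Option Int :=
  match chs with
  | [] => (l, r)
  | ch :: rest =>
      let l' := if ch ∈ pvLeftFrontal ∧ l = none then some i else l
      let r' := if ch ∈ pvRightFrontal ∧ r = none then some i else r
      pvLoopA rest (i + 1) l' r'

def find_frontal_pair_py (channels : List String) : Option Int × Option Int :=
  pvLoopA channels 0 none none

-- ===== PORT B =====
-- hits = [channels.index(n) for n in names if n in channels]:
-- `n in channels` holds exactly when index? returns a value, so the guarded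
-- comprehension is a filterMap of channels.index over the candidate names (exact)
def pvHits (names chs : List String) : List Int :=
  names.filterMap (fun n => (PySem.List.index? chs n).map Int.ofNat)

-- min(hits) if hits else None
def pvFirstOf (names chs : List String) : Option Int :=
  match pvHits names chs with
  | [] => none
  | h :: t => some (t.foldl min h)

def find_frontal_pair_py_alt (channels : List String) : Option Int × Option Int :=
  (pvFirstOf pvLeftFrontal channels, pvFirstOf pvRightFrontal channels)

-- ===== PRECONDITION & SPEC =====
def Spec_find_frontal_pair_py (channels : List String) (out : Option Int × Option Int) : Prop := out = find_frontal_pair_py_alt channels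
instance (channels : List String) (out : Option Int × Option Int) : Decidable (Spec_find_frontal_pair_py channels out) := by unfold Spec_find_frontal_pair_py; infer_instance

-- ===== CLAIM (what is proved, stated in full; the proofs are below) =====
def Claim_equal_find_frontal_pair_py : Prop := ∀ (channels : List String), Dom_find_frontal_pair_py channels → Spec_find_frontal_pair_py channels (find_frontal_pair_py channels)

-- ===== LEMMAS AND PROOFS =====

-- proof-only spec: index of the first channel belonging to `names`
def pvFirst (names chs : List String) : Option Int :=
  match chs with
  | [] => none
  | ch :: rest => if ch ∈ names then some 0 else (pvFirst names rest).map (· + 1)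

-- B's value is the list minimum of the hits
theorem pvFirstOf_eq_min? (names chs : List String) :
    pvFirstOf names chs = (pvHits names chs).min? := by
  cases h : pvHits names chs <;> simp [pvFirstOf, List.min?, h]

theorem pvHits_nonneg (names chs : List String) {x : Int} (hx : x ∈ pvHits names chs) : 0 ≤ x := by
  unfold pvHits at hx
  simp only [List.mem_filterMap, Option.map_eq_some_iff] at hx
  obtain ⟨n, -, k, -, rfl⟩ := hx
  exact Int.natCast_nonneg k

theorem pvHits_cons_of_mem (names chs : List String) (ch : String) (h : ch ∈ names) :
    (0 : Int) ∈ pvHits names (ch :: chs) := by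
  unfold pvHits
  refine List.mem_filterMap.2 ⟨ch, h, ?_⟩
  rw [PySem.List.index?_cons_self]
  rfl

theorem pvHits_cons_of_not_mem (names chs : List String) (ch : String) (h : ch ∉ names) :
    pvHits names (ch :: chs) = (pvHits names chs).map (· + 1) := by
  unfold pvHits
  rw [List.map_filterMap]
  refine List.filterMap_congr (fun n hn => ?_)
  have hne : ch ≠ n := fun e => h (e ▸ hn)
  rw [PySem.List.index?_cons_of_ne _ hne]
  cases PySem.List.index? chs n with
  | none => rfl
  | some k => simp

theorem min?_map_add_one (l : List Int) : (l.map (· + 1)).min? = l.min?.map (· + 1) := by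
  cases hm : l.min? with
  | none =>
      rw [List.min?_eq_none_iff] at hm
      simp [hm]
  | some m =>
      rw [List.min?_eq_some_iff] at hm
      refine List.min?_eq_some_iff.2 ⟨List.mem_map.2 ⟨m, hm.1, rfl⟩, ?_⟩
      intro b hb
      obtain ⟨x, hx, rfl⟩ := List.mem_map.1 hb
      simp only []; have := hm.2 x hx; omega

-- the minimal hit is the first index whose channel is in `names`
theorem min?_pvHits_eq_pvFirst (names chs : List String) :
    (pvHits names chs).min? = pvFirst names chs := by
  induction chs with
  | nil =>
      have : pvHits names [] = [] := by
        unfold pvHits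
        refine List.filterMap_eq_nil_iff.2 (fun n _ => ?_)
        rw [(PySem.List.index?_eq_none_iff _ _).2 (by simp)]
        rfl
      simp [this, pvFirst]
  | cons ch rest ih =>
      by_cases h : ch ∈ names
      · have h0 := pvHits_cons_of_mem names rest ch h
        refine Eq.trans (List.min?_eq_some_iff.2 ⟨h0, fun b hb => pvHits_nonneg _ _ hb⟩) ?_
        simp [pvFirst, h]
      · rw [pvHits_cons_of_not_mem names rest ch h, min?_map_add_one, ih]
        simp [pvFirst, h]

-- A's first-match helper with an offset, and its shift law
def pvFirstIdx (s : List String) (chs : List String) (i : Int) : Option Int :=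
  match chs with
  | [] => none
  | ch :: rest => if ch ∈ s then some i else pvFirstIdx s rest (i + 1)

theorem pvFirstIdx_eq (s chs : List String) (i : Int) :
    pvFirstIdx s chs i = (pvFirst s chs).map (· + i) := by
  induction chs generalizing i with
  | nil => simp [pvFirstIdx, pvFirst]
  | cons ch rest ih =>
      by_cases h : ch ∈ s
      · simp [pvFirstIdx, pvFirst, h]
      · simp only [pvFirstIdx, pvFirst, h, ih]
        cases pvFirst s rest <;> simp [Int.add_comm, Int.add_left_comm]

-- loop invariant: A's loop returns, componentwise, the carried value if already set,
-- else the first match in the remaining list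
theorem pvLoopA_eq (chs : List String) (i : Int) (l r : Option Int) :
    pvLoopA chs i l r =
      ((match l with | some v => some v | none => pvFirstIdx pvLeftFrontal chs i),
       (match r with | some v => some v | none => pvFirstIdx pvRightFrontal chs i)) := by
  induction chs generalizing i l r with
  | nil => cases l <;> cases r <;> simp [pvLoopA, pvFirstIdx]
  | cons ch rest ih =>
      simp only [pvLoopA, ih]
      cases l <;> cases r <;> by_cases hL : ch ∈ pvLeftFrontal <;> by_cases hR : ch ∈ pvRightFrontal <;>
        simp [pvFirstIdx, hL, hR]

-- ===== VERDICT (by name: the statement is the Claim_ definition above) =====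
theorem find_frontal_pair_py_spec : Claim_equal_find_frontal_pair_py := by
  intro channels _
  unfold Spec_find_frontal_pair_py find_frontal_pair_py find_frontal_pair_py_alt
  rw [pvLoopA_eq, pvFirstOf_eq_min?, pvFirstOf_eq_min?, min?_pvHits_eq_pvFirst,
    min?_pvHits_eq_pvFirst, pvFirstIdx_eq, pvFirstIdx_eq]
  simp
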